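-- pv_equiv track=rewrite | github.com/Ignas/dsm_maker | src/dsm_maker/__init__.py | triangle_cluster
-- ===== SOURCE A (Python) =====
-- from collections import defaultdict
--
-- def count_dependencies(node, edges):
--     return len([node for edge in edges if edge[1] == node])
--
-- def collect_transient_dependencies(edges):
--     transient_dependency_map = defaultdict(set)
--     for a, b in edges:
--         transient_dependency_map[a].add(b)
--
--     for v in list(transient_dependency_map.values()):
--         old_deps = set(v)
--         while True:
--             for dep in list(v):
--                 v.update(transient_dependency_map[dep])
--             if v == old_deps:
--                 break
--             old_deps = set(v)
--     return transient_dependency_map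
--
-- def triangle_cluster(nodes, edges):
--     if not nodes:
--         return nodes, edges
--
--     transient_deps = collect_transient_dependencies(edges)
--     items = sorted(nodes, key=lambda n:count_dependencies(n, edges), reverse=True)
--     grouped_items = []
--     taken_items = set()
--     old_items = list(items)
--     while True:
--         for k in list(items):
--             if taken_items.issuperset(transient_deps[k]):
--                 grouped_items.append(k)
--                 taken_items.add(k)
--                 items.remove(k)
--         if old_items == items:
--             break
--         old_items = list(items)
--     nodes = grouped_items + list(items)
--     return nodes, edges
-- ===== SOURCE B (Python) =====
-- from collections import defaultdict
--
-- def triangle_cluster(nodes, edges):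
--     # Build in-degree counts and direct-dependency sets in one pass over the
--     # edges, then run the greedy grouping against DIRECT dependencies only:
--     # a node's direct deps are all taken iff its transitive deps are (each
--     # taken node was itself only taken once its own deps were taken), so the
--     # transitive-closure fixpoint computation of A is unnecessary.
--     if not nodes:
--         return nodes, edges
--
--     indegree = defaultdict(int)
--     direct = defaultdict(set)
--     for a, b in edges:
--         indegree[b] += 1
--         direct[a].add(b)
--
--     items = sorted(nodes, key=lambda n: indegree[n], reverse=True)
--     grouped = []
--     taken = set()
--     moved = True
--     while moved:
--         moved = False
--         for k in list(items):
--             if direct[k] <= taken: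
--                 grouped.append(k)
--                 taken.add(k)
--                 items.remove(k)
--                 moved = True
--     return grouped + items, edges
-- ===== Notes on version B (the rewrite author's own statement) =====
-- stated objective: alternative
-- what changed: B drops A's iterated transitive-closure fixpoint entirely, checking only direct dependencies in the greedy loop (valid because every taken node already has its own deps taken), and replaces A's per-node edge scan for the sort key by one in-degree counting pass over the edges.
import Mathlib
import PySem

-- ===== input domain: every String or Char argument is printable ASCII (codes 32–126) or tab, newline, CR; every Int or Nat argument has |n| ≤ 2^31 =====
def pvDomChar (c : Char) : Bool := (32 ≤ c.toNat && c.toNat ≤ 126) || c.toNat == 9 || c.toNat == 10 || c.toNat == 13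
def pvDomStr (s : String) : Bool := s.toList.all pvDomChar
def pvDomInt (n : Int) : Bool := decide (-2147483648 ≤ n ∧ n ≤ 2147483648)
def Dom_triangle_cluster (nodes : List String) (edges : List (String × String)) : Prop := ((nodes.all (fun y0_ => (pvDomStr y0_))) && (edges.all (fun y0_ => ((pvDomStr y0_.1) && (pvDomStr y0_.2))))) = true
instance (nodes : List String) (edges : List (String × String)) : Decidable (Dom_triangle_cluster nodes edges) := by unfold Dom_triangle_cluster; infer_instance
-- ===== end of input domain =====

-- B drops A's transitive-closure fixpoint (the greedy check against direct deps is
-- equivalent) and builds the sort key by one in-degree counting pass over the edges.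

-- ===== PORT A =====
def countDependencies (node : String) (edges : List (String × String)) : Int :=
  ((edges.filter (fun edge => edge.2 == node)).length : Int)

def buildDeps (edges : List (String × String)) : PySem.Dict String (PySem.Set String) :=
  edges.foldl (fun d ab => d.modify ab.1 PySem.Set.empty (fun s => PySem.Set.add s ab.2))
    PySem.Dict.empty

-- one sweep `for dep in list(v): v.update(map[dep])`; Python's self-lookup m[j] aliases
-- the growing v, but unioning a subset of the accumulator is a no-op, so reading the
-- stored (pass-start) set is exact
def expandOnce (m : PySem.Dict String (PySem.Set String)) (v : PySem.Set String) :
    PySem.Set String :=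
  v.foldl (fun acc dep => PySem.Set.update acc (m.getD dep PySem.Set.empty)) v

-- `while True: … if v == old_deps: break`; every round before the break strictly grows v
-- inside the set of edge targets, so edges.length + 1 rounds always reach the break
def closeLoop (m : PySem.Dict String (PySem.Set String)) :
    Nat → PySem.Set String → PySem.Set String
  | 0, v => v
  | fuel + 1, v =>
    let v' := expandOnce m v
    if PySem.Set.equal v' v then v' else closeLoop m fuel v'

def collectTransientDependencies (edges : List (String × String)) :
    PySem.Dict String (PySem.Set String) :=
  let m0 := buildDeps edges
  -- `for v in list(map.values())`: each stored set is closed in place, in key order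
  m0.keys.foldl
    (fun m j => m.insert j (closeLoop m (edges.length + 1) (m.getD j PySem.Set.empty))) m0

-- `for k in list(items)`; items.remove(k) never fails (k is still present), so the
-- getD fallback is unreachable
def passA (td : PySem.Dict String (PySem.Set String)) :
    List String → List String → PySem.Set String → List String →
    List String × PySem.Set String × List String
  | [], items, taken, grouped => (items, taken, grouped)
  | k :: rest, items, taken, grouped =>
    if PySem.Set.issuperset taken (td.getD k PySem.Set.empty) then
      passA td rest ((PySem.List.remove? items k).getD items) (PySem.Set.add taken k)
        (grouped ++ [k])
    else
      passA td rest items taken grouped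

-- `while True: … if old_items == items: break`; every round before the break removes at
-- least one item, so nodes.length + 1 rounds always reach it
def loopA (td : PySem.Dict String (PySem.Set String)) :
    Nat → List String → PySem.Set String → List String → List String × List String
  | 0, items, _, grouped => (grouped, items)
  | fuel + 1, items, taken, grouped =>
    let r := passA td items items taken grouped
    if items == r.1 then (r.2.2, r.1) else loopA td fuel r.1 r.2.1 r.2.2

def triangle_cluster (nodes : List String) (edges : List (String × String)) :
    List String × (List (String × String)) :=
  if nodes.isEmpty then (nodes, edges)
  else
    let td := collectTransientDependencies edges
    let items := PySem.List.sorted nodes (fun n => countDependencies n edges) true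
    let r := loopA td (nodes.length + 1) items PySem.Set.empty []
    (r.1 ++ r.2, edges)

-- ===== PORT B =====
def passB (direct : PySem.Dict String (PySem.Set String)) :
    List String → List String → PySem.Set String → List String → Bool →
    List String × PySem.Set String × List String × Bool
  | [], items, taken, grouped, moved => (items, taken, grouped, moved)
  | k :: rest, items, taken, grouped, moved =>
    if PySem.Set.issubset (direct.getD k PySem.Set.empty) taken then
      passB direct rest ((PySem.List.remove? items k).getD items) (PySem.Set.add taken k)
        (grouped ++ [k]) true
    else
      passB direct rest items taken grouped moved

def loopB (direct : PySem.Dict String (PySem.Set String)) :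
    Nat → List String → PySem.Set String → List String → List String × List String
  | 0, items, _, grouped => (grouped, items)
  | fuel + 1, items, taken, grouped =>
    let r := passB direct items items taken grouped false
    if r.2.2.2 then loopB direct fuel r.1 r.2.1 r.2.2.1 else (r.2.2.1, r.1)

def triangle_cluster_alt (nodes : List String) (edges : List (String × String)) :
    List String × (List (String × String)) :=
  if nodes.isEmpty then (nodes, edges)
  else
    let maps := edges.foldl
      (fun (st : PySem.Dict String Int × PySem.Dict String (PySem.Set String)) ab =>
        (st.1.modify ab.2 0 (· + 1),
         st.2.modify ab.1 PySem.Set.empty (fun s => PySem.Set.add s ab.2)))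
      (PySem.Dict.empty, PySem.Dict.empty)
    let items := PySem.List.sorted nodes (fun n => maps.1.getD n 0) true
    let r := loopB maps.2 (nodes.length + 1) items PySem.Set.empty []
    (r.1 ++ r.2, edges)

-- ===== PRECONDITION & SPEC =====
def Spec_triangle_cluster (nodes : List String) (edges : List (String × String)) (out : List String × (List (String × String))) : Prop := out = triangle_cluster_alt nodes edges
instance (nodes : List String) (edges : List (String × String)) (out : List String × (List (String × String))) : Decidable (Spec_triangle_cluster nodes edges out) := by unfold Spec_triangle_cluster; infer_instance

-- ===== CLAIM (what is proved, stated in full; the proofs are below) =====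
def Claim_equal_triangle_cluster : Prop := ∀ (nodes : List String) (edges : List (String × String)), Dom_triangle_cluster nodes edges → Spec_triangle_cluster nodes edges (triangle_cluster nodes edges)

-- ===== LEMMAS AND PROOFS =====

-- x is reachable from k in ≥ 1 step along the direct-dependency map d
inductive Reach (d : PySem.Dict String (PySem.Set String)) : String → String → Prop
  | base {k x : String} : x ∈ d.getD k PySem.Set.empty → Reach d k x
  | step {k y x : String} : Reach d k y → x ∈ d.getD y PySem.Set.empty → Reach d k x

theorem reach_trans {d : PySem.Dict String (PySem.Set String)} {k y x : String}
    (h1 : Reach d k y) (h2 : Reach d y x) : Reach d k x := by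
  induction h2 with
  | base h => exact Reach.step h1 h
  | step _ h ih => exact Reach.step ih h

-- every stored set is sound (⊆ reachability) and complete for direct deps
def Sand (d m : PySem.Dict String (PySem.Set String)) : Prop :=
  ∀ k : String,
    (∀ x ∈ m.getD k PySem.Set.empty, Reach d k x) ∧
    (∀ x ∈ d.getD k PySem.Set.empty, x ∈ m.getD k PySem.Set.empty)

theorem fold_update_good {d m : PySem.Dict String (PySem.Set String)} {j : String} :
    ∀ (l : List String) (acc : PySem.Set String),
      Sand d m → (∀ dep ∈ l, Reach d j dep) → (∀ x ∈ acc, Reach d j x) →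
      ∀ x ∈ l.foldl (fun acc dep => PySem.Set.update acc (m.getD dep PySem.Set.empty)) acc,
        Reach d j x := by
  intro l
  induction l with
  | nil => intro acc _ _ hacc x hx; exact hacc x hx
  | cons dep rest ih =>
    intro acc hS hl hacc x hx
    refine ih _ hS (fun a ha => hl a (List.mem_cons_of_mem _ ha)) ?_ x hx
    intro y hy
    rcases (PySem.Set.mem_update _ _ _).mp hy with h | h
    · exact hacc y h
    · exact reach_trans (hl dep (List.mem_cons_self)) ((hS dep).1 y h)

theorem fold_update_supset {m : PySem.Dict String (PySem.Set String)} :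
    ∀ (l : List String) (acc : PySem.Set String) (x : String), x ∈ acc →
      x ∈ l.foldl (fun acc dep => PySem.Set.update acc (m.getD dep PySem.Set.empty)) acc := by
  intro l
  induction l with
  | nil => intro acc x hx; exact hx
  | cons dep rest ih =>
    intro acc x hx
    exact ih _ x ((PySem.Set.mem_update _ _ _).mpr (Or.inl hx))

theorem closeLoop_good {d m : PySem.Dict String (PySem.Set String)} {j : String}
    (hS : Sand d m) :
    ∀ (fuel : Nat) (v : PySem.Set String), (∀ x ∈ v, Reach d j x) →
      ∀ x ∈ closeLoop m fuel v, Reach d j x := by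
  intro fuel
  induction fuel with
  | zero => intro v hv; exact hv
  | succ n ih =>
    intro v hv
    have hgood : ∀ x ∈ expandOnce m v, Reach d j x :=
      fold_update_good v v hS hv hv
    simp only [closeLoop]
    split
    · exact hgood
    · exact ih _ hgood

theorem closeLoop_supset {m : PySem.Dict String (PySem.Set String)} :
    ∀ (fuel : Nat) (v : PySem.Set String) (x : String), x ∈ v → x ∈ closeLoop m fuel v := by
  intro fuel
  induction fuel with
  | zero => intro v x hx; exact hx
  | succ n ih =>
    intro v x hx
    have hx' : x ∈ expandOnce m v := fold_update_supset v v x hx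
    simp only [closeLoop]
    split
    · exact hx'
    · exact ih _ x hx'

theorem sand_fold {d : PySem.Dict String (PySem.Set String)} (F : Nat) :
    ∀ (keys : List String) (m : PySem.Dict String (PySem.Set String)), Sand d m →
      Sand d (keys.foldl
        (fun m j => m.insert j (closeLoop m F (m.getD j PySem.Set.empty))) m) := by
  intro keys
  induction keys with
  | nil => intro m hm; exact hm
  | cons j rest ih =>
    intro m hm
    refine ih _ ?_
    intro k
    by_cases hk : k = j
    · subst hk
      constructor
      · intro x hx
        rw [PySem.Dict.getD_insert, if_pos rfl] at hx
        exact closeLoop_good hm F _ (hm k).1 x hx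
      · intro x hx
        rw [PySem.Dict.getD_insert, if_pos rfl]
        exact closeLoop_supset F _ x ((hm k).2 x hx)
    · constructor
      · intro x hx
        rw [PySem.Dict.getD_insert] at hx
        simp only [if_neg hk] at hx
        exact (hm k).1 x hx
      · intro x hx
        rw [PySem.Dict.getD_insert]
        simp only [if_neg hk]
        exact (hm k).2 x hx

theorem collect_sand (edges : List (String × String)) :
    Sand (buildDeps edges) (collectTransientDependencies edges) := by
  unfold collectTransientDependencies
  exact sand_fold _ _ _ (fun k => ⟨fun x hx => Reach.base hx, fun x hx => hx⟩)

-- taken is closed under direct dependencies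
def ClosedT (d : PySem.Dict String (PySem.Set String)) (taken : PySem.Set String) : Prop :=
  ∀ t ∈ taken, ∀ x ∈ d.getD t PySem.Set.empty, x ∈ taken

theorem reach_taken {d : PySem.Dict String (PySem.Set String)} {taken : PySem.Set String}
    {k x : String} (hC : ClosedT d taken)
    (hk : ∀ y ∈ d.getD k PySem.Set.empty, y ∈ taken) (h : Reach d k x) : x ∈ taken := by
  induction h with
  | base h => exact hk _ h
  | step _ h ih => exact hC _ ih _ h

theorem check_eq {d td : PySem.Dict String (PySem.Set String)} {taken : PySem.Set String}
    (hS : Sand d td) (hC : ClosedT d taken) (k : String) :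
    PySem.Set.issuperset taken (td.getD k PySem.Set.empty) =
      PySem.Set.issubset (d.getD k PySem.Set.empty) taken := by
  cases hA : PySem.Set.issuperset taken (td.getD k PySem.Set.empty) with
  | true =>
    have h := (PySem.Set.issuperset_iff _ _).mp hA
    symm
    exact (PySem.Set.issubset_iff _ _).mpr (fun x hx => h x ((hS k).2 x hx))
  | false =>
    cases hB : PySem.Set.issubset (d.getD k PySem.Set.empty) taken with
    | false => rfl
    | true =>
      exfalso
      have h := (PySem.Set.issubset_iff _ _).mp hB
      have : PySem.Set.issuperset taken (td.getD k PySem.Set.empty) = true :=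
        (PySem.Set.issuperset_iff _ _).mpr
          (fun x hx => reach_taken hC h ((hS k).1 x hx))
      rw [hA] at this
      exact Bool.false_ne_true this

theorem closedT_add {d : PySem.Dict String (PySem.Set String)} {taken : PySem.Set String}
    {k : String} (hC : ClosedT d taken)
    (hk : ∀ x ∈ d.getD k PySem.Set.empty, x ∈ taken) :
    ClosedT d (PySem.Set.add taken k) := by
  intro t ht x hx
  rcases (PySem.Set.mem_add _ _ _).mp ht with h | h
  · exact (PySem.Set.mem_add _ _ _).mpr (Or.inl (hC t h x hx))
  · subst h
    exact (PySem.Set.mem_add _ _ _).mpr (Or.inl (hk x hx))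

theorem pass_eq {d td : PySem.Dict String (PySem.Set String)} (hS : Sand d td) :
    ∀ (s items : List String) (taken : PySem.Set String) (grouped : List String)
      (moved : Bool), ClosedT d taken → (∀ v, s.count v ≤ items.count v) →
      ((passB d s items taken grouped moved).1 = (passA td s items taken grouped).1 ∧
       (passB d s items taken grouped moved).2.1 = (passA td s items taken grouped).2.1 ∧
       (passB d s items taken grouped moved).2.2.1 = (passA td s items taken grouped).2.2 ∧
       ClosedT d (passA td s items taken grouped).2.1 ∧
       ((passA td s items taken grouped = (items, taken, grouped) ∧
         (passB d s items taken grouped moved).2.2.2 = moved) ∨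
        ((passA td s items taken grouped).1.length < items.length ∧
         (passB d s items taken grouped moved).2.2.2 = true))) := by
  intro s
  induction s with
  | nil =>
    intro items taken grouped moved hC _
    exact ⟨rfl, rfl, rfl, hC, Or.inl ⟨rfl, rfl⟩⟩
  | cons k rest ih =>
    intro items taken grouped moved hC hcnt
    have hchk := check_eq hS hC k
    by_cases hcond : PySem.Set.issubset (d.getD k PySem.Set.empty) taken = true
    · -- branch fires
      have hmem : k ∈ items := by
        have h1 : 0 < items.count k := by
          have := hcnt k
          simp [List.count_cons_self] at this
          omega
        exact List.count_pos_iff.mp h1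
      have hrem : (PySem.List.remove? items k).getD items = items.erase k := by
        rw [PySem.List.remove?_eq_some_erase items k hmem]; rfl
      have hcnt' : ∀ v, rest.count v ≤ (items.erase k).count v := by
        intro v
        by_cases hv : v = k
        · subst hv
          have := hcnt v
          rw [List.count_erase_self]
          simp [List.count_cons_self] at this
          omega
        · rw [List.count_erase_of_ne hv]
          have := hcnt v
          simp [List.count_cons] at this
          omega
      have hCk : ∀ x ∈ d.getD k PySem.Set.empty, x ∈ taken :=
        (PySem.Set.issubset_iff _ _).mp hcond
      have hC' : ClosedT d (PySem.Set.add taken k) := closedT_add hC hCk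
      have hlen : (items.erase k).length < items.length := by
        rw [List.length_erase_of_mem hmem]
        have : 0 < items.length := List.length_pos_of_mem hmem
        omega
      have hA : passA td (k :: rest) items taken grouped =
          passA td rest (items.erase k) (PySem.Set.add taken k) (grouped ++ [k]) := by
        simp only [passA, hchk, hcond, if_pos, hrem]
      have hB : passB d (k :: rest) items taken grouped moved =
          passB d rest (items.erase k) (PySem.Set.add taken k) (grouped ++ [k]) true := by
        simp only [passB, hcond, if_pos, hrem]
      obtain ⟨e1, e2, e3, hC'', hdisj⟩ :=
        ih (items.erase k) (PySem.Set.add taken k) (grouped ++ [k]) true hC' hcnt'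
      rw [hA, hB]
      refine ⟨e1, e2, e3, hC'', Or.inr ?_⟩
      rcases hdisj with ⟨heq, hm⟩ | ⟨hl, hm⟩
      · rw [heq]; exact ⟨hlen, hm⟩
      · exact ⟨Nat.lt_trans hl hlen, hm⟩
    · -- branch does not fire
      have hcond' : PySem.Set.issubset (d.getD k PySem.Set.empty) taken = false := by
        cases h : PySem.Set.issubset (d.getD k PySem.Set.empty) taken
        · rfl
        · exact absurd h hcond
      have hcnt' : ∀ v, rest.count v ≤ items.count v := by
        intro v
        have := hcnt v
        by_cases hv : v = k
        · subst hv; simp [List.count_cons_self] at this; omega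
        · simp [List.count_cons] at this; omega
      have hA : passA td (k :: rest) items taken grouped =
          passA td rest items taken grouped := by
        simp only [passA, hchk, hcond', Bool.false_eq_true, if_false]
      have hB : passB d (k :: rest) items taken grouped moved =
          passB d rest items taken grouped moved := by
        simp only [passB, hcond', Bool.false_eq_true, if_false]
      rw [hA, hB]
      exact ih items taken grouped moved hC hcnt'

theorem loop_eq {d td : PySem.Dict String (PySem.Set String)} (hS : Sand d td) :
    ∀ (fuel : Nat) (items : List String) (taken : PySem.Set String)
      (grouped : List String), ClosedT d taken →
      loopA td fuel items taken grouped = loopB d fuel items taken grouped := by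
  intro fuel
  induction fuel with
  | zero => intro items taken grouped _; rfl
  | succ n ih =>
    intro items taken grouped hC
    obtain ⟨e1, e2, e3, hC', hdisj⟩ :=
      pass_eq hS items items taken grouped false hC (fun v => le_refl _)
    simp only [loopA, loopB]
    rcases hdisj with ⟨heq, hm⟩ | ⟨hl, hm⟩
    · rw [heq, hm, e1, e3, heq]
      simp
    · have hne : (items == (passA td items items taken grouped).1) = false := by
        rw [beq_eq_false_iff_ne]
        intro h
        rw [← h] at hl
        omega
      rw [hne, hm, e1, e2, e3]
      simp only [Bool.false_eq_true, if_false, if_true]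
      exact ih _ _ _ hC'

theorem foldl_pair {α β γ : Type} (l : List γ) (f : α → γ → α) (g : β → γ → β) :
    ∀ (a : α) (b : β),
      l.foldl (fun st x => (f st.1 x, g st.2 x)) (a, b) = (l.foldl f a, l.foldl g b) := by
  induction l with
  | nil => intro a b; rfl
  | cons x rest ih => intro a b; exact ih (f a x) (g b x)

theorem indeg_key_eq (edges : List (String × String)) (n : String) :
    (edges.foldl (fun d ab => PySem.Dict.modify d ab.2 0 (· + 1))
        PySem.Dict.empty).getD n 0 = countDependencies n edges := by
  have h1 : edges.foldl (fun d ab => PySem.Dict.modify d ab.2 0 (· + 1))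
      PySem.Dict.empty = PySem.Dict.counter (edges.map (fun e => e.2)) := by
    rw [PySem.Dict.counter_eq_foldl, List.foldl_map]
  rw [h1, PySem.Dict.getD_counter]
  unfold countDependencies
  congr 1
  rw [List.count_eq_countP]
  rw [List.countP_map]
  rw [List.countP_eq_length_filter]
  rfl

theorem main_eq (nodes : List String) (edges : List (String × String)) :
    triangle_cluster nodes edges = triangle_cluster_alt nodes edges := by
  unfold triangle_cluster triangle_cluster_alt
  by_cases hn : nodes.isEmpty
  · simp [hn]
  · simp only [hn, Bool.false_eq_true, if_false]
    have hmaps : edges.foldl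
        (fun (st : PySem.Dict String Int × PySem.Dict String (PySem.Set String)) ab =>
          (st.1.modify ab.2 0 (· + 1),
           st.2.modify ab.1 PySem.Set.empty (fun s => PySem.Set.add s ab.2)))
        (PySem.Dict.empty, PySem.Dict.empty) =
        (edges.foldl (fun d ab => PySem.Dict.modify d ab.2 0 (· + 1)) PySem.Dict.empty,
         buildDeps edges) := by
      unfold buildDeps
      exact foldl_pair edges
        (fun d ab => PySem.Dict.modify d ab.2 0 (· + 1))
        (fun d ab => PySem.Dict.modify d ab.1 PySem.Set.empty (fun s => PySem.Set.add s ab.2))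
        PySem.Dict.empty PySem.Dict.empty
    rw [hmaps]
    have hkey : (fun n => (edges.foldl (fun d ab => PySem.Dict.modify d ab.2 0 (· + 1))
        PySem.Dict.empty).getD n 0) = (fun n => countDependencies n edges) := by
      funext n; exact indeg_key_eq edges n
    simp only [hkey]
    have hloop := loop_eq (d := buildDeps edges) (collect_sand edges)
      (nodes.length + 1)
      (PySem.List.sorted nodes (fun n => countDependencies n edges) true)
      PySem.Set.empty [] (fun t ht => absurd ht (List.not_mem_nil))
    rw [hloop]

-- ===== VERDICT (by name: the statement is the Claim_ definition above) =====
theorem triangle_cluster_spec : Claim_equal_triangle_cluster := by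
  intro nodes edges _
  unfold Spec_triangle_cluster
  exact main_eq nodes edges
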